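-- pv_equiv track=rewrite | github.com/islasimpson/CASanalysis | CASutils/lensread_utils.py | lens2memnamegen_first50
-- ===== SOURCE A (Python) =====
-- def lens2memnamegen_first50(nmems):
--     """Generate the member names for LENS2 simulations
--     Input:
--       nmems = number of members
--     Output:
--       memstr(nmems) = an array containing nmems strings corresponding to the member names
--     """
--
--     memstr=[]
--     for imem in range(0,nmems,1):
--
--         if (imem < 10):
--             memstr1=str(1000+imem*20+1)
--             memstr2=str(imem+1).zfill(3)
--             memstr.append(memstr1+'.'+memstr2)
--
--         if ((imem >= 10) and (imem < 20)):
--             memstr1=str(1231)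
--             memstr2=str(imem-10+1).zfill(3)
--             memstr.append(memstr1+'.'+memstr2)
--
--         if ((imem >= 20) and (imem < 30)):
--             memstr1=str(1251)
--             memstr2=str(imem-20+1).zfill(3)
--             memstr.append(memstr1+'.'+memstr2)
--
--         if ((imem >= 30) and (imem < 40)):
--             memstr1=str(1281)
--             memstr2=str(imem-30+1).zfill(3)
--             memstr.append(memstr1+'.'+memstr2)
--
--         if ((imem >= 40) and (imem < 50)):
--             memstr1=str(1301)
--             memstr2=str(imem-40+1).zfill(3)
--             memstr.append(memstr1+'.'+memstr2)
--
--
--     return memstr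
-- ===== SOURCE B (Python) =====
-- def lens2memnamegen_first50(nmems):
--     """Generate the member names for LENS2 simulations (prefix-table formulation)."""
--     prefixes = [1001 + i * 20 for i in range(10)] \
--         + [1231] * 10 + [1251] * 10 + [1281] * 10 + [1301] * 10
--     return [f"{prefixes[i]}.{str(i % 10 + 1).zfill(3)}" for i in range(min(nmems, 50))]
-- ===== Notes on version B (the rewrite author's own statement) =====
-- stated objective: simpler
-- what changed: Replaces the per-iteration chain of five range-guarded if-branches by a prefix table built once and a single capped comprehension with a uniform suffix formula, so work stops at the cap instead of looping over the whole requested count.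
import Mathlib
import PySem

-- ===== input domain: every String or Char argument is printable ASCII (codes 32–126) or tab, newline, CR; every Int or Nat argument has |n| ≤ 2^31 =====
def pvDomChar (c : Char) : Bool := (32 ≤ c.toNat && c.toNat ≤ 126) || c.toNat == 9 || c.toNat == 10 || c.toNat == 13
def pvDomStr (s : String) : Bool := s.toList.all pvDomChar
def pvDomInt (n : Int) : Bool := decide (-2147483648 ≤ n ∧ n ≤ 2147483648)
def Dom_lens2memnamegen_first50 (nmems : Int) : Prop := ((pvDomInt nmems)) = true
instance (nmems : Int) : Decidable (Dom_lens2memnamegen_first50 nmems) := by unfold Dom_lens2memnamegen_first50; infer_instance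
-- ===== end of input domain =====

-- B replaces A's per-iteration chain of five range-guarded if-branches by a prefix
-- table built once and a single capped uniform pass (simpler decomposition).


-- ===== PORT A =====
-- one iteration of A's loop body: five sequential range-guarded appends
def pvABody (acc : List String) (imem : Int) : List String :=
  let acc := if imem < 10 then
      acc ++ [PySem.Int.toStr (1000 + imem * 20 + 1) ++ "." ++ PySem.Str.zfill (PySem.Int.toStr (imem + 1)) 3]
    else acc
  let acc := if 10 ≤ imem ∧ imem < 20 then
      acc ++ [PySem.Int.toStr 1231 ++ "." ++ PySem.Str.zfill (PySem.Int.toStr (imem - 10 + 1)) 3]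
    else acc
  let acc := if 20 ≤ imem ∧ imem < 30 then
      acc ++ [PySem.Int.toStr 1251 ++ "." ++ PySem.Str.zfill (PySem.Int.toStr (imem - 20 + 1)) 3]
    else acc
  let acc := if 30 ≤ imem ∧ imem < 40 then
      acc ++ [PySem.Int.toStr 1281 ++ "." ++ PySem.Str.zfill (PySem.Int.toStr (imem - 30 + 1)) 3]
    else acc
  let acc := if 40 ≤ imem ∧ imem < 50 then
      acc ++ [PySem.Int.toStr 1301 ++ "." ++ PySem.Str.zfill (PySem.Int.toStr (imem - 40 + 1)) 3]
    else acc
  acc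

def lens2memnamegen_first50 (nmems : Int) : List String :=
  (PySem.List.pyRange 0 nmems 1).foldl pvABody []

-- ===== PORT B =====
-- the 50-entry prefix table, built once (Source B's list-comprehension + replications)
def pvPrefixes : List Int :=
  (PySem.List.pyRange 0 10 1).map (fun i => 1001 + i * 20)
    ++ List.replicate 10 1231 ++ List.replicate 10 1251
    ++ List.replicate 10 1281 ++ List.replicate 10 1301

def lens2memnamegen_first50_alt (nmems : Int) : List String :=
  -- prefixes[i]: the index is always in range here, so getD 0 is never the default
  (PySem.List.pyRange 0 (min nmems 50) 1).map (fun i =>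
    PySem.Int.toStr ((PySem.List.pyGet? pvPrefixes i).getD 0) ++ "."
      ++ PySem.Str.zfill (PySem.Int.toStr (i % 10 + 1)) 3)

-- ===== PRECONDITION & SPEC =====
def Spec_lens2memnamegen_first50 (nmems : Int) (out : List String) : Prop := out = lens2memnamegen_first50_alt nmems
instance (nmems : Int) (out : List String) : Decidable (Spec_lens2memnamegen_first50 nmems out) := by unfold Spec_lens2memnamegen_first50; infer_instance

-- ===== CLAIM (what is proved, stated in full; the proofs are below) =====
def Claim_equal_lens2memnamegen_first50 : Prop := ∀ (nmems : Int), Dom_lens2memnamegen_first50 nmems → Spec_lens2memnamegen_first50 nmems (lens2memnamegen_first50 nmems)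

-- ===== LEMMAS AND PROOFS =====

-- A's loop body is the identity once imem ≥ 50 (all five guards are false)
theorem pvABody_ge_50 (acc : List String) (imem : Int) (h : 50 ≤ imem) :
    pvABody acc imem = acc := by
  simp only [pvABody]
  split_ifs <;> first | rfl | omega

theorem foldl_pvABody_ge_50 (l : List Int) (acc : List String)
    (h : ∀ x ∈ l, 50 ≤ x) : l.foldl pvABody acc = acc := by
  induction l generalizing acc with
  | nil => rfl
  | cons a t ih =>
      simp only [List.foldl_cons]
      rw [pvABody_ge_50 acc a (h a (by simp))]
      exact ih acc (fun x hx => h x (List.mem_cons_of_mem a hx))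

-- A stops producing anything past the 50th iteration
theorem lens2memnamegen_first50_cap (nmems : Int) (h : 50 ≤ nmems) :
    lens2memnamegen_first50 nmems = lens2memnamegen_first50 50 := by
  unfold lens2memnamegen_first50
  rw [PySem.List.pyRange_one_append 0 50 nmems (by omega) h, List.foldl_append]
  exact foldl_pvABody_ge_50 _ _ (fun x hx => (PySem.List.mem_pyRange_one.mp hx).1)

theorem lens2memnamegen_first50_alt_cap (nmems : Int) (h : 50 ≤ nmems) :
    lens2memnamegen_first50_alt nmems = lens2memnamegen_first50_alt 50 := by
  unfold lens2memnamegen_first50_alt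
  rw [min_eq_right h, min_eq_right (le_refl (50 : Int))]

-- ===== VERDICT (by name: the statement is the Claim_ definition above) =====
set_option maxRecDepth 20000 in
theorem lens2memnamegen_first50_spec : Claim_equal_lens2memnamegen_first50 := by
  intro nmems _
  unfold Spec_lens2memnamegen_first50
  by_cases h50 : 50 ≤ nmems
  · rw [lens2memnamegen_first50_cap nmems h50, lens2memnamegen_first50_alt_cap nmems h50]
    decide
  · by_cases h0 : nmems ≤ 0
    · unfold lens2memnamegen_first50 lens2memnamegen_first50_alt
      rw [PySem.List.pyRange_one_eq_nil h0,
          PySem.List.pyRange_one_eq_nil (by omega : min nmems 50 ≤ 0)]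
      rfl
    · have h1 : 1 ≤ nmems := by omega
      have h2 : nmems ≤ 49 := by omega
      interval_cases nmems <;> decide
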